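-- pv_equiv track=rewrite | github.com/quantalogic/quantalogic | quantalogic/tools/document_tools/markdown_to_epub_tool.py | _split_chapters
-- ===== SOURCE A (Python) =====
-- from typing import ClassVar, Dict, List, Optional
--
-- def _split_chapters(content: str) -> List[Dict[str, str]]:
--     """Split markdown content into chapters."""
--     chapters = []
--     current_chapter = []
--     current_title = "Untitled Chapter"
--
--     for line in content.split('\n'):
--         if line.strip() == '---':
--             if current_chapter:
--                 chapters.append({
--                     'title': current_title,
--                     'content': '\n'.join(current_chapter)
--                 })
--                 current_chapter = []
--                 current_title = "Untitled Chapter"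
--         else:
--             if line.startswith('# '):
--                 current_title = line[2:].strip()
--             current_chapter.append(line)
--
--     if current_chapter:
--         chapters.append({
--             'title': current_title,
--             'content': '\n'.join(current_chapter)
--         })
--
--     return chapters
-- ===== SOURCE B (Python) =====
-- from typing import Dict, List
--
--
-- def _split_chapters(content: str) -> List[Dict[str, str]]:
--     """Split markdown content into chapters: partition pass, then transform pass."""
--     groups = []
--     cur = []
--     for line in content.split('\n'):
--         if line.strip() == '---':
--             groups.append(cur)
--             cur = []
--         else:
--             cur.append(line)
--     groups.append(cur)
--     return [
--         {
--             'title': next((l[2:].strip() for l in reversed(g) if l.startswith('# ')),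
--                           'Untitled Chapter'),
--             'content': '\n'.join(g),
--         }
--         for g in groups
--         if g
--     ]
-- ===== Notes on version B (the rewrite author's own statement) =====
-- stated objective: alternative
-- what changed: Replaces A's interleaved accumulate-and-flush loop (carrying chapters, current lines and a running title) with two separate passes: first partition the lines into groups split on '---' separators, then map each non-empty group to a chapter, finding the title by a backward scan for the last '# ' line.
import Mathlib
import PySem

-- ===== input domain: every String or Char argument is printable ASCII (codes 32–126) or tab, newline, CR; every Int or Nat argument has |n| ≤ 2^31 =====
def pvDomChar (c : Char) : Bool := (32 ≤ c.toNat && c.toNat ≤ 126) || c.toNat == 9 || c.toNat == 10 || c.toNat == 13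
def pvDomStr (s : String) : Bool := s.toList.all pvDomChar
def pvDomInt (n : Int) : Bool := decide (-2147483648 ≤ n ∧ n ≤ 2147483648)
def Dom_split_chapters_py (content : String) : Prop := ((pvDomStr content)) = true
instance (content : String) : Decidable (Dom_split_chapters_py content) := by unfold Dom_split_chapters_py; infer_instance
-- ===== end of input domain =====

-- B partitions the lines into '---'-separated groups first, then maps each non-empty group to
-- a chapter (title = last '# ' line, found by a backward scan); A accumulates and flushes in one loop.

-- content.split('\n'); exact: the separator "\n" is non-empty, so Python's split never raises
def splitChaptersLines (content : String) : List String :=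
  (PySem.Str.split? content "\n").getD []

-- ===== PORT A =====
-- the loop body of A, over state (chapters, current_chapter, current_title); the final flush at []
def splitChaptersALoop : List String → List (List (String × String)) → List String → String →
    List (List (String × String))
  | [], chapters, currentChapter, currentTitle =>
      if currentChapter ≠ [] then
        chapters ++ [[("title", currentTitle), ("content", PySem.Str.join "\n" currentChapter)]]
      else chapters
  | line :: rest, chapters, currentChapter, currentTitle =>
      if PySem.Str.strip line == "---" then
        if currentChapter ≠ [] then
          splitChaptersALoop rest
            (chapters ++ [[("title", currentTitle), ("content", PySem.Str.join "\n" currentChapter)]])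
            [] "Untitled Chapter"
        else
          splitChaptersALoop rest chapters currentChapter currentTitle
      else
        splitChaptersALoop rest chapters (currentChapter ++ [line])
          (if PySem.Str.startswith line "# " then
            PySem.Str.strip (PySem.Str.slice line (some 2) none)
          else currentTitle)

def split_chapters_py (content : String) : List (List (String × String)) :=
  splitChaptersALoop (splitChaptersLines content) [] [] "Untitled Chapter"

-- ===== PORT B =====
-- partition pass: groups of lines, split on separator lines
def splitChaptersGroups : List String → List String → List (List String)
  | [], cur => [cur]
  | line :: rest, cur =>
      if PySem.Str.strip line == "---" then cur :: splitChaptersGroups rest []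
      else splitChaptersGroups rest (cur ++ [line])

-- first '# ' line of a (reversed) group → its title
def splitChaptersTitleRev : List String → String
  | [] => "Untitled Chapter"
  | line :: rest =>
      if PySem.Str.startswith line "# " then
        PySem.Str.strip (PySem.Str.slice line (some 2) none)
      else splitChaptersTitleRev rest

def splitChaptersChapter (g : List String) : List (String × String) :=
  [("title", splitChaptersTitleRev g.reverse), ("content", PySem.Str.join "\n" g)]

def split_chapters_py_alt (content : String) : List (List (String × String)) :=
  ((splitChaptersGroups (splitChaptersLines content) []).filter (· ≠ [])).map
    splitChaptersChapter

-- ===== PRECONDITION & SPEC =====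
def Spec_split_chapters_py (content : String) (out : List (List (String × String))) : Prop := out = split_chapters_py_alt content
instance (content : String) (out : List (List (String × String))) : Decidable (Spec_split_chapters_py content out) := by unfold Spec_split_chapters_py; infer_instance

-- ===== CLAIM (what is proved, stated in full; the proofs are below) =====
def Claim_equal_split_chapters_py : Prop := ∀ (content : String), Dom_split_chapters_py content → Spec_split_chapters_py content (split_chapters_py content)

-- ===== LEMMAS AND PROOFS =====

-- A's loop state invariant: current_title is what B's backward title scan computes on the
-- current group; then A's remaining run equals chapters ++ B's transform of the remaining groups.
theorem splitChaptersALoop_eq (ls : List String) :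
    ∀ (chapters : List (List (String × String))) (cur : List String),
    splitChaptersALoop ls chapters cur (splitChaptersTitleRev cur.reverse) =
      chapters ++ ((splitChaptersGroups ls cur).filter (· ≠ [])).map splitChaptersChapter := by
  induction ls with
  | nil =>
      intro chapters cur
      simp only [splitChaptersALoop, splitChaptersGroups, List.filter]
      by_cases h : cur = []
      · subst h; simp
      · simp [h, splitChaptersChapter]
  | cons line rest ih =>
      intro chapters cur
      simp only [splitChaptersALoop, splitChaptersGroups]
      by_cases hsep : PySem.Str.strip line == "---"
      · simp only [hsep, if_true]
        by_cases h : cur = []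
        · subst h
          have := ih chapters []
          simpa [splitChaptersTitleRev] using this
        · have hthis := ih (chapters ++ [splitChaptersChapter cur]) []
          simp only [splitChaptersTitleRev, List.reverse_nil, splitChaptersChapter] at hthis
          rw [hthis]
          simp [h, splitChaptersChapter]
      · simp only [hsep, if_false, Bool.false_eq_true]
        have hrev : splitChaptersTitleRev (cur ++ [line]).reverse =
            (if PySem.Str.startswith line "# " then
              PySem.Str.strip (PySem.Str.slice line (some 2) none)
            else splitChaptersTitleRev cur.reverse) := by
          simp [splitChaptersTitleRev]
        rw [← hrev]
        exact ih chapters (cur ++ [line])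

-- ===== VERDICT (by name: the statement is the Claim_ definition above) =====
theorem split_chapters_py_spec : Claim_equal_split_chapters_py := by
  intro content _
  unfold Spec_split_chapters_py split_chapters_py split_chapters_py_alt
  have := splitChaptersALoop_eq (splitChaptersLines content) [] []
  simpa [splitChaptersTitleRev] using this
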